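-- pv_equiv track=rewrite | github.com/odylith/odylith | src/odylith/runtime/context_engine/path_bundle_codec.py | expand_path_rows
-- ===== SOURCE A (Python) =====
-- from typing import Any
-- from typing import Sequence
--
-- def _string_rows(value: Any) -> list[str]:
--     rows: list[str] = []
--     seen: set[str] = set()
--     if isinstance(value, str):
--         value = [value]
--     if not isinstance(value, Sequence):
--         return rows
--     for item in value:
--         token = str(item or "").strip()
--         if not token or token in seen:
--             continue
--         seen.add(token)
--         rows.append(token)
--     return rows
--
-- def expand_path_rows(value: Any) -> list[str]:
--     expanded: list[str] = []
--     for token in _string_rows(value):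
--         if "{" not in token or not token.endswith("}"):
--             expanded.append(token)
--             continue
--         prefix, _, suffix_block = token.partition("{")
--         suffixes = [part.strip() for part in suffix_block[:-1].split(",") if part.strip()]
--         if not prefix or not suffixes:
--             expanded.append(token)
--             continue
--         expanded.extend(f"{prefix}{suffix}" for suffix in suffixes)
--     return _string_rows(expanded)
-- ===== SOURCE B (Python) =====
-- from typing import Any
-- from typing import Sequence
--
--
-- def _candidates(token: str) -> list[str]:
--     head, brace, block = token.partition("{")
--     if not brace or not token.endswith("}") or not head:
--         return [token]
--     tails = [part.strip() for part in block[:-1].split(",") if part.strip()]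
--     return [head + tail for tail in tails] if tails else [token]
--
--
-- def expand_path_rows(value: Any) -> list[str]:
--     if isinstance(value, str):
--         value = [value]
--     if not isinstance(value, Sequence):
--         return []
--     out: list[str] = []
--     seen: set[str] = set()
--     for item in value:
--         token = str(item or "").strip()
--         if not token:
--             continue
--         for candidate in _candidates(token):
--             if candidate not in seen:
--                 seen.add(candidate)
--                 out.append(candidate)
--     return out
-- ===== Notes on version B (the rewrite author's own statement) =====
-- stated objective: simpler
-- what changed: A makes three passes (dedup+strip tokens, expand braces into an intermediate list, dedup+strip again); B makes one fused pass with a single seen-set, appending each token's candidates directly and dropping both the intermediate list and the second dedup helper, and it also drops the redundant token-level dedup.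
import Mathlib
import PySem

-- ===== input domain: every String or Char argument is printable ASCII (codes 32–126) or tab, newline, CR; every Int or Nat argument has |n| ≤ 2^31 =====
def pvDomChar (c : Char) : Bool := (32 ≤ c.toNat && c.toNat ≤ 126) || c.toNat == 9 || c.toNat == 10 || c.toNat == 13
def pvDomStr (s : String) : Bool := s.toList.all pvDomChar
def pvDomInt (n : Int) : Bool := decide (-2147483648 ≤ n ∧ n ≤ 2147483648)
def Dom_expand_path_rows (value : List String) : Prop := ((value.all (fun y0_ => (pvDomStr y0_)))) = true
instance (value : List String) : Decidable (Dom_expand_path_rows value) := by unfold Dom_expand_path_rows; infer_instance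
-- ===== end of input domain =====

-- B replaces A's three passes (dedup tokens, expand, dedup again) by ONE fused pass with a single seen-set; same output (alternative decomposition, no speed claim).
-- Strings are modelled as List Char inside the ports (PySem.Chars is Python-exact); conversion happens only at the input/output boundary.

-- ===== PORT A =====
-- hand port of str.partition("{") (PySem has no partition); exact for the single-character separator '{'
def pvPartitionBrace (cs : List Char) : List Char × List Char × List Char :=
  let pre := cs.takeWhile (fun c => c ≠ '{')
  if pre.length = cs.length then (cs, [], [])
  else (pre, ['{'], cs.drop (pre.length + 1))

-- _string_rows restricted to a list of strings ('str(item or "")' is the identity on a str item)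
def pvStringRows (value : List (List Char)) : List (List Char) :=
  (value.foldl
    (fun (st : List (List Char) × PySem.Set (List Char)) item =>
      let token := PySem.Chars.strip item
      if token = [] ∨ token ∈ st.2 then st
      else (st.1 ++ [token], PySem.Set.add st.2 token))
    ([], PySem.Set.empty)).1

def expand_path_rows (value : List String) : List String :=
  pvStringRows ((pvStringRows (value.map String.toList)).foldl
    (fun acc token =>
      if PySem.Chars.isIn ['{'] token = false ∨ PySem.Chars.endswith token ['}'] = false then
        acc ++ [token]
      else
        let p := pvPartitionBrace token
        let suffixes := ((PySem.Chars.splitOn (PySem.List.slice p.2.2 none (some (-1))) [',']).map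
            PySem.Chars.strip).filter (fun s => s ≠ [])
        if p.1 = [] ∨ suffixes = [] then acc ++ [token]
        else acc ++ suffixes.map (fun suf => p.1 ++ suf))
    []) |>.map (fun cs => String.ofList cs)

-- ===== PORT B =====
def pvCandidates (token : List Char) : List (List Char) :=
  let p := pvPartitionBrace token
  if p.2.1 = [] ∨ PySem.Chars.endswith token ['}'] = false ∨ p.1 = [] then [token]
  else
    let tails := ((PySem.Chars.splitOn (PySem.List.slice p.2.2 none (some (-1))) [',']).map
        PySem.Chars.strip).filter (fun s => s ≠ [])
    if tails = [] then [token] else tails.map (fun t => p.1 ++ t)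

def expand_path_rows_alt (value : List String) : List String :=
  ((value.foldl
    (fun (st : List (List Char) × PySem.Set (List Char)) item =>
      let token := PySem.Chars.strip item.toList
      if token = [] then st
      else (pvCandidates token).foldl
        (fun (st : List (List Char) × PySem.Set (List Char)) c =>
          if c ∈ st.2 then st else (st.1 ++ [c], PySem.Set.add st.2 c)) st)
    ([], PySem.Set.empty)).1).map (fun cs => String.ofList cs)

-- ===== PRECONDITION & SPEC =====
def Spec_expand_path_rows (value : List String) (out : List String) : Prop := out = expand_path_rows_alt value
instance (value : List String) (out : List String) : Decidable (Spec_expand_path_rows value out) := by unfold Spec_expand_path_rows; infer_instance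

-- ===== CLAIM (what is proved, stated in full; the proofs are below) =====
def Claim_equal_expand_path_rows : Prop := ∀ (value : List String), Dom_expand_path_rows value → Spec_expand_path_rows value (expand_path_rows value)

-- ===== LEMMAS AND PROOFS =====

-- ordered dedup against a seen-set, the shape both ports reduce to
def pvDd (xs : List (List Char)) (s : PySem.Set (List Char)) : List (List Char) :=
  match xs with
  | [] => []
  | x :: xs => if x ∈ s then pvDd xs s else x :: pvDd xs (PySem.Set.add s x)

-- the stripped nonempty tokens of a raw list, duplicates kept
def pvTokens (value : List (List Char)) : List (List Char) :=
  (value.map PySem.Chars.strip).filter (fun t => t ≠ [])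

theorem pv_mem_foldl_add {s : PySem.Set (List Char)} {xs : List (List Char)} {x : List Char} :
    x ∈ xs.foldl PySem.Set.add s ↔ x ∈ s ∨ x ∈ xs := by
  induction xs generalizing s with
  | nil => simp
  | cons y ys ih =>
    simp only [List.foldl_cons, ih, PySem.Set.mem_add, List.mem_cons]
    tauto

-- G1: the fused dedup fold is pvDd plus the updated seen-set
theorem pv_foldl_dd (xs : List (List Char)) (out : List (List Char)) (s : PySem.Set (List Char)) :
    xs.foldl (fun (st : List (List Char) × PySem.Set (List Char)) c =>
        if c ∈ st.2 then st else (st.1 ++ [c], PySem.Set.add st.2 c)) (out, s)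
      = (out ++ pvDd xs s, xs.foldl PySem.Set.add s) := by
  induction xs generalizing out s with
  | nil => simp [pvDd]
  | cons x xs ih =>
    by_cases hx : x ∈ s
    · simp [pvDd, hx, ih]
    · simp [pvDd, hx, ih]

-- G2: pvDd over an append
theorem pv_dd_append (xs ys : List (List Char)) (s : PySem.Set (List Char)) :
    pvDd (xs ++ ys) s = pvDd xs s ++ pvDd ys (xs.foldl PySem.Set.add s) := by
  induction xs generalizing s with
  | nil => simp [pvDd]
  | cons x xs ih =>
    by_cases hx : x ∈ s
    · simp [pvDd, hx, ih]
    · simp [pvDd, hx, ih]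

-- G3: a block already entirely seen contributes nothing and changes nothing
theorem pv_dd_all_mem {xs : List (List Char)} {s : PySem.Set (List Char)}
    (h : ∀ x ∈ xs, x ∈ s) : pvDd xs s = [] ∧ xs.foldl PySem.Set.add s = s := by
  induction xs with
  | nil => simp [pvDd]
  | cons x xs ih =>
    have hx : x ∈ s := h x (by simp)
    have := ih (fun y hy => h y (by simp [hy]))
    simp [pvDd, hx, this]

theorem pv_dd_subset {xs : List (List Char)} {s : PySem.Set (List Char)} {x : List Char}
    (h : x ∈ pvDd xs s) : x ∈ xs := by
  induction xs generalizing s with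
  | nil => simp [pvDd] at h
  | cons y ys ih =>
    by_cases hy : y ∈ s
    · simp [pvDd, hy] at h; exact List.mem_cons_of_mem _ (ih h)
    · simp only [pvDd, if_neg hy, List.mem_cons] at h
      rcases h with h | h
      · simp [h]
      · exact List.mem_cons_of_mem _ (ih h)

-- A1: _string_rows is pvDd of the stripped nonempty tokens
theorem pv_stringRows_eq (value : List (List Char)) (out : List (List Char)) (s : PySem.Set (List Char)) :
    (value.foldl
      (fun (st : List (List Char) × PySem.Set (List Char)) item =>
        let token := PySem.Chars.strip item
        if token = [] ∨ token ∈ st.2 then st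
        else (st.1 ++ [token], PySem.Set.add st.2 token)) (out, s)).1
      = out ++ pvDd (pvTokens value) s := by
  induction value generalizing out s with
  | nil => simp [pvTokens, pvDd]
  | cons item rest ih =>
    by_cases h0 : PySem.Chars.strip item = []
    · simp only [List.foldl_cons, if_pos (Or.inl h0), ih]
      simp [pvTokens, h0]
    · by_cases h1 : PySem.Chars.strip item ∈ s
      · simp only [List.foldl_cons, if_pos (Or.inr h1), ih]
        simp [pvTokens, pvDd, h0, h1]
      · simp only [List.foldl_cons, ih]
        simp [pvTokens, pvDd, h0, h1]

-- the '"{" in token' test matches partition's 'found' test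
theorem pv_isIn_brace (token : List Char) :
    PySem.Chars.isIn ['{'] token = false ↔ (token.takeWhile (fun c => c ≠ '{')).length = token.length := by
  rw [PySem.Chars.isIn_eq_false_iff, List.singleton_infix_iff]
  constructor
  · intro h
    rw [List.takeWhile_eq_self_iff.2 (by intro c hc; simp; rintro rfl; exact h hc)]
  · intro h hmem
    have hpre : token.takeWhile (fun c => c ≠ '{') = token :=
      (List.takeWhile_prefix _).eq_of_length h
    have := List.mem_takeWhile_imp (hpre ▸ hmem)
    simp at this

-- A2: A's expansion body appends exactly pvCandidates
theorem pv_body_eq (acc : List (List Char)) (token : List Char) :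
    (if PySem.Chars.isIn ['{'] token = false ∨ PySem.Chars.endswith token ['}'] = false then
        acc ++ [token]
      else
        let p := pvPartitionBrace token
        let suffixes := ((PySem.Chars.splitOn (PySem.List.slice p.2.2 none (some (-1))) [',']).map
            PySem.Chars.strip).filter (fun s => s ≠ [])
        if p.1 = [] ∨ suffixes = [] then acc ++ [token]
        else acc ++ suffixes.map (fun suf => p.1 ++ suf))
      = acc ++ pvCandidates token := by
  unfold pvCandidates pvPartitionBrace
  by_cases hlen : (token.takeWhile (fun c => c ≠ '{')).length = token.length
  · have hin : PySem.Chars.isIn ['{'] token = false := (pv_isIn_brace token).2 hlen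
    rw [if_pos (Or.inl hin)]
    simp only [if_pos hlen]
    simp
  · have hin : PySem.Chars.isIn ['{'] token ≠ false := fun h => hlen ((pv_isIn_brace token).1 h)
    simp only [if_neg hlen]
    by_cases hend : PySem.Chars.endswith token ['}'] = false
    · rw [if_pos (Or.inr hend), if_pos (Or.inr (Or.inl hend))]
    · rw [if_neg (show ¬(PySem.Chars.isIn ['{'] token = false ∨
          PySem.Chars.endswith token ['}'] = false) from by tauto)]
      by_cases hp : (token.takeWhile (fun c => c ≠ '{')) = []
      · rw [if_pos (Or.inl hp), if_pos (Or.inr (Or.inr hp))]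
      · rw [if_neg (show ¬((['{'] : List Char) = [] ∨
            PySem.Chars.endswith token ['}'] = false ∨
            (token.takeWhile (fun c => c ≠ '{')) = []) from by
            refine fun h => ?_
            rcases h with h | h | h
            · simp at h
            · exact hend h
            · exact hp h)]
        by_cases hs : ((PySem.Chars.splitOn (PySem.List.slice (token.drop ((token.takeWhile (fun c => c ≠ '{')).length + 1)) none (some (-1))) [',']).map
            PySem.Chars.strip).filter (fun s => s ≠ []) = []
        · rw [if_pos (Or.inr hs), if_pos hs]
        · rw [if_neg (show ¬_ from by tauto), if_neg hs]

-- strip-shape facts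
theorem pv_strip_eq_self {x : List Char}
    (h1 : ∀ c, x.head? = some c → PySem.Chars.isspace c = false)
    (h2 : ∀ c, x.getLast? = some c → PySem.Chars.isspace c = false) :
    PySem.Chars.strip x = x := by
  have hl : PySem.Chars.lstrip x = x := by
    cases x with
    | nil => rfl
    | cons a t => simp [PySem.Chars.lstrip, h1 a rfl]
  rw [PySem.Chars.strip, hl, PySem.Chars.rstrip]
  cases hx : x.reverse with
  | nil => simp_all
  | cons b t =>
    have hb : x.getLast? = some b := by
      rw [← List.head?_reverse, hx]; rfl
    rw [List.dropWhile_cons, h2 b hb]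
    simp only [Bool.false_eq_true, if_false]
    rw [← hx, List.reverse_reverse]

theorem pv_strip_ends {y : List Char} :
    (∀ c, (PySem.Chars.strip y).head? = some c → PySem.Chars.isspace c = false) ∧
    (∀ c, (PySem.Chars.strip y).getLast? = some c → PySem.Chars.isspace c = false) := by
  set u := PySem.Chars.lstrip y with hu
  have hhead : ∀ c, u.head? = some c → PySem.Chars.isspace c = false := by
    intro c hc
    have h3 := List.head?_dropWhile_not PySem.Chars.isspace y
    rw [show List.dropWhile PySem.Chars.isspace y = u from rfl, hc] at h3
    exact h3
  constructor
  · intro c hc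
    have hsuf : (PySem.Chars.strip y).reverse <:+ u.reverse := by
      rw [PySem.Chars.strip, ← hu, PySem.Chars.rstrip, List.reverse_reverse]
      exact List.dropWhile_suffix _
    have hpre : PySem.Chars.strip y <+: u := List.reverse_suffix.mp hsuf
    rcases hpre with ⟨t, ht⟩
    apply hhead
    rw [← ht]
    cases h : PySem.Chars.strip y with
    | nil => rw [h] at hc; simp at hc
    | cons a s => rw [h] at hc; simpa using hc
  · intro c hc
    have h2 : ((PySem.Chars.strip y).reverse).head? = some c := by
      rw [List.head?_reverse]; exact hc
    rw [PySem.Chars.strip, ← hu, PySem.Chars.rstrip, List.reverse_reverse] at h2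
    have h3 := List.head?_dropWhile_not PySem.Chars.isspace u.reverse
    rw [h2] at h3
    exact h3

-- every candidate of a stripped nonempty token is itself stripped and nonempty
theorem pv_candidates_stripped {t c : List Char} (ht : PySem.Chars.strip t = t) (hne : t ≠ [])
    (hc : c ∈ pvCandidates t) : PySem.Chars.strip c = c ∧ c ≠ [] := by
  have hH : ∀ a, t.head? = some a → PySem.Chars.isspace a = false := by
    have := (pv_strip_ends (y := t)).1; rwa [ht] at this
  unfold pvCandidates pvPartitionBrace at hc
  by_cases hlen : (t.takeWhile (fun c => c ≠ '{')).length = t.length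
  · simp only [if_pos hlen] at hc
    simp at hc
    subst hc; exact ⟨ht, hne⟩
  · simp only [if_neg hlen] at hc
    by_cases hcond : (['{'] : List Char) = [] ∨ PySem.Chars.endswith t ['}'] = false ∨
        (t.takeWhile (fun c => c ≠ '{')) = []
    · rw [if_pos hcond] at hc
      simp at hc; subst hc; exact ⟨ht, hne⟩
    · rw [if_neg hcond] at hc
      have hp : (t.takeWhile (fun c => c ≠ '{')) ≠ [] := by tauto
      split_ifs at hc with h2
      · simp at hc; subst hc; exact ⟨ht, hne⟩
      · simp only [List.mem_map] at hc
        rcases hc with ⟨suf, hsuf, rfl⟩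
        have hsne : suf ≠ [] := by
          have := List.of_mem_filter hsuf
          simpa using this
        have hsufmem := List.mem_of_mem_filter hsuf
        simp only [List.mem_map] at hsufmem
        rcases hsufmem with ⟨part, _, rfl⟩
        refine ⟨pv_strip_eq_self ?_ ?_, List.append_ne_nil_of_left_ne_nil hp _⟩
        · intro a ha
          rw [List.head?_append_of_ne_nil _ hp] at ha
          apply hH
          cases htk : t with
          | nil => exact absurd htk hne
          | cons b l =>
            rw [htk, List.takeWhile_cons] at ha hp
            split_ifs at ha hp with hb
            · simp at ha; rw [ha] at *; simp
            · exact absurd rfl hp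
        · intro a ha
          have hrw : (t.takeWhile (fun c => c ≠ '{') ++ PySem.Chars.strip part).getLast?
              = (PySem.Chars.strip part).getLast? := List.getLast?_append_of_ne_nil _ hsne
          rw [hrw] at ha
          exact (pv_strip_ends).2 a ha

-- M: deduplicating the tokens first does not change the deduplicated expansion
theorem pv_main (ts : List (List Char)) (tseen s : PySem.Set (List Char))
    (h : ∀ t ∈ tseen, ∀ e ∈ pvCandidates t, e ∈ s) :
    pvDd ((pvDd ts tseen).flatMap pvCandidates) s = pvDd (ts.flatMap pvCandidates) s := by
  induction ts generalizing tseen s with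
  | nil => rfl
  | cons t ts ih =>
    by_cases htm : t ∈ tseen
    · rw [show pvDd (t :: ts) tseen = pvDd ts tseen from by simp [pvDd, htm]]
      have hall := pv_dd_all_mem (fun x hx => h t htm x hx)
      rw [List.flatMap_cons, pv_dd_append, hall.1, hall.2, List.nil_append]
      exact ih tseen s h
    · rw [show pvDd (t :: ts) tseen = t :: pvDd ts (PySem.Set.add tseen t) from by
        simp [pvDd, htm]]
      rw [List.flatMap_cons, List.flatMap_cons, pv_dd_append, pv_dd_append]
      congr 1
      apply ih
      intro t' ht' e he
      rw [pv_mem_foldl_add]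
      rcases (PySem.Set.mem_add tseen t t').mp ht' with h1 | h1
      · exact Or.inl (h t' h1 e he)
      · subst h1; exact Or.inr he

theorem pv_strip_idem (y : List Char) :
    PySem.Chars.strip (PySem.Chars.strip y) = PySem.Chars.strip y :=
  pv_strip_eq_self (pv_strip_ends).1 (pv_strip_ends).2

theorem pv_rows_eq (w : List (List Char)) :
    pvStringRows w = pvDd (pvTokens w) PySem.Set.empty := by
  unfold pvStringRows
  have := pv_stringRows_eq w [] PySem.Set.empty
  simpa using this

-- every token _string_rows produces is stripped and nonempty
theorem pv_mem_tokens {w : List (List Char)} {t : List Char} (h : t ∈ pvTokens w) :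
    PySem.Chars.strip t = t ∧ t ≠ [] := by
  unfold pvTokens at h
  have h2 := List.of_mem_filter h
  have h1 := List.mem_of_mem_filter h
  simp only [List.mem_map] at h1
  rcases h1 with ⟨raw, _, rfl⟩
  exact ⟨pv_strip_idem raw, by simpa using h2⟩

-- B1: B's fused fold is pvDd of the expanded token stream
theorem pv_alt_eq (v : List String) (out : List (List Char)) (s : PySem.Set (List Char)) :
    (v.foldl
      (fun (st : List (List Char) × PySem.Set (List Char)) item =>
        let token := PySem.Chars.strip item.toList
        if token = [] then st
        else (pvCandidates token).foldl
          (fun (st : List (List Char) × PySem.Set (List Char)) c =>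
            if c ∈ st.2 then st else (st.1 ++ [c], PySem.Set.add st.2 c)) st)
      (out, s)).1
    = out ++ pvDd ((pvTokens (v.map String.toList)).flatMap pvCandidates) s := by
  induction v generalizing out s with
  | nil => simp [pvTokens, pvDd]
  | cons item rest ih =>
    by_cases h0 : PySem.Chars.strip item.toList = []
    · simp only [List.foldl_cons, if_pos h0, ih]
      simp [pvTokens, h0]
    · simp only [List.foldl_cons, if_neg h0, pv_foldl_dd, ih]
      rw [show pvTokens ((item :: rest).map String.toList)
          = PySem.Chars.strip item.toList :: pvTokens (rest.map String.toList) from by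
        simp [pvTokens, h0]]
      rw [List.flatMap_cons, pv_dd_append, List.append_assoc]

-- A2': A's expansion fold is the flatMap of pvCandidates
theorem pv_expand_eq (rows acc : List (List Char)) :
    rows.foldl
      (fun acc token =>
        if PySem.Chars.isIn ['{'] token = false ∨ PySem.Chars.endswith token ['}'] = false then
          acc ++ [token]
        else
          let p := pvPartitionBrace token
          let suffixes := ((PySem.Chars.splitOn (PySem.List.slice p.2.2 none (some (-1))) [',']).map
              PySem.Chars.strip).filter (fun s => s ≠ [])
          if p.1 = [] ∨ suffixes = [] then acc ++ [token]
          else acc ++ suffixes.map (fun suf => p.1 ++ suf)) acc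
    = acc ++ rows.flatMap pvCandidates := by
  have hb : (fun (acc : List (List Char)) (token : List Char) =>
      if PySem.Chars.isIn ['{'] token = false ∨ PySem.Chars.endswith token ['}'] = false then
        acc ++ [token]
      else
        let p := pvPartitionBrace token
        let suffixes := ((PySem.Chars.splitOn (PySem.List.slice p.2.2 none (some (-1))) [',']).map
            PySem.Chars.strip).filter (fun s => s ≠ [])
        if p.1 = [] ∨ suffixes = [] then acc ++ [token]
        else acc ++ suffixes.map (fun suf => p.1 ++ suf))
      = fun acc token => acc ++ pvCandidates token := by
    funext acc token
    exact pv_body_eq acc token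
  rw [hb, PySem.List.foldl_append_eq_flatMap]

-- ===== VERDICT (by name: the statement is the Claim_ definition above) =====
theorem expand_path_rows_spec : Claim_equal_expand_path_rows := by
  intro value _
  unfold Spec_expand_path_rows expand_path_rows expand_path_rows_alt
  rw [pv_alt_eq value [] PySem.Set.empty, List.nil_append]
  rw [pv_expand_eq, List.nil_append, pv_rows_eq]
  set w := value.map String.toList with hw
  set expanded := (pvDd (pvTokens w) PySem.Set.empty).flatMap pvCandidates with hexp
  have hfact : ∀ x ∈ expanded, PySem.Chars.strip x = x ∧ x ≠ [] := by
    intro x hx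
    rw [hexp, List.mem_flatMap] at hx
    rcases hx with ⟨tk, htk, hx⟩
    rcases pv_mem_tokens (pv_dd_subset htk) with ⟨h1, h2⟩
    exact pv_candidates_stripped h1 h2 hx
  rw [pv_rows_eq]
  rw [show pvTokens expanded = expanded from by
    unfold pvTokens
    rw [List.map_congr_left (fun x hx => (hfact x hx).1), List.map_id']
    exact List.filter_eq_self.2 (fun x hx => by simpa using (hfact x hx).2)]
  rw [pv_main _ _ _ (fun t ht => by simp [PySem.Set.empty] at ht)]
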